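-- pv_equiv track=rewrite | github.com/msc24x/dtable | main/script.py | zeroOrAlt
-- ===== SOURCE A (Python) =====
-- def zeroOrAlt(l):
-- 	allZero = True
-- 	sign = -1
-- 	alt = True
-- 	for e in l:
-- 		if e != 0:
-- 			allZero = False
-- 		if sign == -1:
-- 			sign = (e >= 0)
-- 		elif sign == (e >= 0):
-- 			alt = False
-- 		sign = (e >= 0)
-- 	return allZero or alt
-- ===== SOURCE B (Python) =====
-- def zeroOrAlt(l):
--     if set(l) <= {0}:
--         return True
--     first = l[0] >= 0
--     pattern = [first if i % 2 == 0 else not first for i in range(len(l))]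
--     return [e >= 0 for e in l] == pattern
-- ===== Notes on version B (the rewrite author's own statement) =====
-- stated objective: alternative
-- what changed: Instead of a stateful single pass tracking the previous sign, B deduplicates the list into a set for the all-zero test (set(l) <= {0}) and checks alternation by constructing the full expected alternating sign pattern from the first element and comparing it with the list of actual signs.
import Mathlib
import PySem

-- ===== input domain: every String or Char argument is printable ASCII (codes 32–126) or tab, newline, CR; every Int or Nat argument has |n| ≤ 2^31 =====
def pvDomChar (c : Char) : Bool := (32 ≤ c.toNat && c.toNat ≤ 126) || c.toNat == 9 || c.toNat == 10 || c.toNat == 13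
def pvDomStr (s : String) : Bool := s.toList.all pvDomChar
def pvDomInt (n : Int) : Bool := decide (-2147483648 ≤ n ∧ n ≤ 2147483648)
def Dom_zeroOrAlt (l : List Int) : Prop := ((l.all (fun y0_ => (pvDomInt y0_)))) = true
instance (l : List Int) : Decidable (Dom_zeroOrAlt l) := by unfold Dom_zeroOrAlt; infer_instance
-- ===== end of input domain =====

-- B replaces A's stateful single pass (sign sentinel + two flags) by a set-based all-zero
-- test plus a comparison of the sign list with a constructed alternating pattern (alternative).


-- ===== PORT A =====
-- state = (allZero, sign, alt); sign : Option Bool, none plays Python's -1 sentinel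
-- (sign == (e >= 0) is False in Python while sign is -1, i.e. none here)
def stepA (st : Bool × Option Bool × Bool) (e : Int) : Bool × Option Bool × Bool :=
  let az := if e ≠ 0 then false else st.1
  match st.2.1 with
  | none => (az, some (decide (e ≥ 0)), st.2.2)
  | some s => (az, some (decide (e ≥ 0)), if s = decide (e ≥ 0) then false else st.2.2)

def zeroOrAlt (l : List Int) : Bool :=
  let r := l.foldl stepA (true, none, true)
  r.1 || r.2.2

-- ===== PORT B =====
def zeroOrAlt_alt (l : List Int) : Bool :=
  if PySem.Set.issubset (PySem.Set.ofList l) [0] then true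
  else
    match l with
    | [] => true   -- unreachable: the empty set is a subset of {0}
    | e :: _ =>
      let first := decide (e ≥ 0)
      let pattern := (List.range l.length).map (fun i => if i % 2 == 0 then first else !first)
      (l.map (fun x => decide (x ≥ 0))) == pattern

-- ===== PRECONDITION & SPEC =====
def Spec_zeroOrAlt (l : List Int) (out : Bool) : Prop := out = zeroOrAlt_alt l
instance (l : List Int) (out : Bool) : Decidable (Spec_zeroOrAlt l out) := by unfold Spec_zeroOrAlt; infer_instance

-- ===== CLAIM (what is proved, stated in full; the proofs are below) =====
def Claim_equal_zeroOrAlt : Prop := ∀ (l : List Int), Dom_zeroOrAlt l → Spec_zeroOrAlt l (zeroOrAlt l)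

-- ===== LEMMAS AND PROOFS =====

-- expected alternating sign pattern of length n starting with b
def patFrom (b : Bool) : Nat → List Bool
  | 0 => []
  | n + 1 => b :: patFrom (!b) n

-- A's alternation chain given the previous sign s
def altFrom (s : Bool) : List Int → Bool
  | [] => true
  | e :: t => (s != decide (e ≥ 0)) && altFrom (decide (e ≥ 0)) t

lemma altFrom_eq_pat (l : List Int) : ∀ s : Bool,
    altFrom s l = (l.map (fun x => decide (x ≥ 0)) == patFrom (!s) l.length) := by
  induction l with
  | nil => intro s; rfl
  | cons e t ih =>
      intro s
      simp only [altFrom, List.map_cons, List.length_cons, patFrom, ih]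
      cases s <;> cases h : decide (e ≥ 0) <;> simp [bne]

lemma range_map_eq_patFrom (b : Bool) (n : Nat) :
    (List.range n).map (fun i => if i % 2 == 0 then b else !b) = patFrom b n := by
  induction n generalizing b with
  | zero => rfl
  | succ m ih =>
      rw [List.range_succ_eq_map, List.map_cons, List.map_map]
      simp only [patFrom]
      congr 1
      rw [← ih (!b)]
      apply List.map_congr_left
      intro i _
      rcases Nat.mod_two_eq_zero_or_one i with h | h
      · have h1 : (i + 1) % 2 = 1 := by omega
        simp [Function.comp, h, h1]
      · have h1 : (i + 1) % 2 = 0 := by omega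
        simp [Function.comp, h, h1]

lemma foldA_some (l : List Int) : ∀ (az alt s : Bool),
    ((l.foldl stepA (az, some s, alt)).1 || (l.foldl stepA (az, some s, alt)).2.2)
      = ((az && l.all (fun e => e == 0)) || (alt && altFrom s l)) := by
  induction l with
  | nil => intro az alt s; cases az <;> cases alt <;> simp [altFrom]
  | cons e t ih =>
      intro az alt s
      have hstep : List.foldl stepA (az, some s, alt) (e :: t)
          = List.foldl stepA ((if e ≠ 0 then false else az), some (decide (e ≥ 0)),
              (if s = decide (e ≥ 0) then false else alt)) t := rfl
      rw [hstep, ih]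
      simp only [altFrom]
      generalize decide (e ≥ 0) = d
      by_cases h0 : e = 0 <;> cases az <;> cases alt <;> cases s <;> cases d <;>
        simp_all [bne]

lemma issubset_zero (l : List Int) :
    PySem.Set.issubset (PySem.Set.ofList l) [0] = l.all (fun e => e == 0) := by
  rcases h : l.all (fun e => e == 0) with _ | _
  · rw [Bool.eq_false_iff]
    intro hs
    rw [PySem.Set.issubset_iff] at hs
    simp only [List.all_eq_false] at h
    obtain ⟨x, hx, hxne⟩ := h
    have := hs x (by simp [PySem.Set.mem_ofList, hx])
    simp_all
  · rw [PySem.Set.issubset_iff]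
    intro x hx
    rw [PySem.Set.mem_ofList] at hx
    simp only [List.all_eq_true] at h
    have := h x hx
    simp_all

-- ===== VERDICT (by name: the statement is the Claim_ definition above) =====
theorem zeroOrAlt_spec : Claim_equal_zeroOrAlt := by
  intro l _
  show zeroOrAlt l = zeroOrAlt_alt l
  cases l with
  | nil => rfl
  | cons e t =>
      have hstep : zeroOrAlt (e :: t)
          = ((List.foldl stepA ((if e ≠ 0 then false else true), some (decide (e ≥ 0)), true) t).1
            || (List.foldl stepA ((if e ≠ 0 then false else true), some (decide (e ≥ 0)), true) t).2.2) := rfl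
      rw [hstep, foldA_some]
      simp only [zeroOrAlt_alt, issubset_zero, range_map_eq_patFrom,
        altFrom_eq_pat, List.all_cons, List.length_cons, patFrom, List.map_cons]
      by_cases h0 : e = 0 <;> cases hd : decide (e ≥ 0) <;>
        simp_all
      congr 1
      rw [Bool.eq_iff_iff]
      simp
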